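-- pv_equiv track=rewrite | github.com/keen1014/algorithm | 프로그래머스/2/17683. ［3차］ 방금그곡/［3차］ 방금그곡.py | solution
-- ===== SOURCE A (Python) =====
-- def solution(m, musicinfos):
--     def rplace_sharps(s):
--         return s.replace('C#', 'c').replace('D#','d').replace('F#', 'f').replace('G#', 'g').replace('A#','a').replace('E#','e').replace('B#','b')
--     m=rplace_sharps(m)
--     tmp = []
--     for v,i in enumerate(musicinfos):
--         li=[]
--         i=i.split(',')
--         i[0]=list(map(int,i[0].split(':')))[0]*60+list(map(int,i[0].split(':')))[1]
--         i[1]=list(map(int,i[1].split(':')))[0]*60+list(map(int,i[1].split(':')))[1]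
--         i[3]=rplace_sharps(i[3])
--         if not i[3]:
--             continue
--         for j in range(1,i[1]-i[0]+1):
--             if len(i[3])<j:
--                 li.append(i[3][(j%len(i[3]))-1])
--             else:
--                 li.append(i[3][j-1])
--         if m in ''.join(li):
--             tmp.append([i[1]-i[0],i[2], v])
--     if tmp:
--         tmp=sorted(tmp, key=lambda x: (-x[0], x[2]))
--         return tmp[0][1]
--     else:
--         return "(None)"
-- ===== SOURCE B (Python) =====
-- def solution(m, musicinfos):
--     def norm(s):
--         for a, b in (('C#', 'c'), ('D#', 'd'), ('F#', 'f'), ('G#', 'g'),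
--                      ('A#', 'a'), ('E#', 'e'), ('B#', 'b')):
--             s = s.replace(a, b)
--         return s
--
--     def to_min(t):
--         parts = t.split(':')
--         return int(parts[0]) * 60 + int(parts[1])
--
--     m = norm(m)
--     best = None  # (duration, title); replaced only on strictly greater duration
--     for info in musicinfos:
--         p = info.split(',')
--         dur = to_min(p[1]) - to_min(p[0])
--         sheet = norm(p[3])
--         if not sheet:
--             continue
--         played = (sheet * (dur // len(sheet) + 1))[:dur]
--         if m in played and (best is None or dur > best[0]):
--             best = (dur, p[2])
--     return "(None)" if best is None else best[1]
-- ===== Notes on version B (the rewrite author's own statement) =====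
-- stated objective: simpler
-- what changed: B builds each played melody by repeating the sheet and slicing a prefix instead of A's per-second modulo-indexed append loop, and picks the answer in one linear pass keeping the first strictly-longest match instead of collecting all matches and sorting by (-duration, index).
import Mathlib
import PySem

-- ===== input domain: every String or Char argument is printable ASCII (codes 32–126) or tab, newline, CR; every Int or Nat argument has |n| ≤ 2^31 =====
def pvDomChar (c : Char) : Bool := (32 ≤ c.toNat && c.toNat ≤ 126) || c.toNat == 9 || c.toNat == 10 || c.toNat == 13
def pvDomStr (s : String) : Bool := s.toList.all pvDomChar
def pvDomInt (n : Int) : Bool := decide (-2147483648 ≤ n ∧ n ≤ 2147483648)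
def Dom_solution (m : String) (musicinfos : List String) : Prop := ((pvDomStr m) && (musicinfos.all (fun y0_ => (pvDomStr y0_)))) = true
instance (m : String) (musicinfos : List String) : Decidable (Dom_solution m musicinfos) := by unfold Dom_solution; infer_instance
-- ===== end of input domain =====

-- B replaces A's per-second modulo-indexed melody loop by repeat-and-slice, and A's
-- collect-all-matches-then-sort selection by a single running-best pass (strict '>', so the
-- earliest longest match wins exactly like A's stable sort).  Objective: simpler.

-- ===== PORT A =====
-- A's rplace_sharps: chained str.replace calls
def pvSharpA (s : List Char) : List Char :=
  PySem.Chars.replace (PySem.Chars.replace (PySem.Chars.replace (PySem.Chars.replace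
    (PySem.Chars.replace (PySem.Chars.replace (PySem.Chars.replace s
      ['C','#'] ['c']) ['D','#'] ['d']) ['F','#'] ['f']) ['G','#'] ['g'])
      ['A','#'] ['a']) ['E','#'] ['e']) ['B','#'] ['b']

-- A's  list(map(int, t.split(':')))[0]*60 + list(map(int, t.split(':')))[1]
-- (getD defaults are unreachable under Pre_solution, where every piece parses and there are ≥ 2)
def pvTimeA (t : List Char) : Int :=
  ((PySem.List.pyGet? ((PySem.Chars.splitOn t [':']).map (fun p => (PySem.Int.ofChars? p).getD 0)) 0).getD 0) * 60 +
  ((PySem.List.pyGet? ((PySem.Chars.splitOn t [':']).map (fun p => (PySem.Int.ofChars? p).getD 0)) 1).getD 0)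

-- one iteration of A's 'for v, i in enumerate(musicinfos)' loop body
def pvStepA (mm : List Char) (tmp : List (Int × List Char × Int)) (vi : Int × String) :
    List (Int × List Char × Int) :=
  let parts := PySem.Chars.splitOn vi.2.toList [',']
  let t0 := pvTimeA ((PySem.List.pyGet? parts 0).getD [])
  let t1 := pvTimeA ((PySem.List.pyGet? parts 1).getD [])
  let sheet := pvSharpA ((PySem.List.pyGet? parts 3).getD [])
  if sheet = [] then tmp
  else
    let li := (PySem.List.pyRange 1 (t1 - t0 + 1)).foldl (fun li j =>
      if (sheet.length : Int) < j then
        li ++ [(PySem.List.pyGet? sheet (PySem.Int.mod j (sheet.length : Int) - 1)).getD ' ']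
      else
        li ++ [(PySem.List.pyGet? sheet (j - 1)).getD ' ']) []
    if PySem.Chars.isIn mm li then
      tmp ++ [(t1 - t0, (PySem.List.pyGet? parts 2).getD [], vi.1)]
    else tmp

def solution (m : String) (musicinfos : List String) : String :=
  let mm := pvSharpA m.toList
  let tmp := (PySem.List.enumerate musicinfos).foldl (pvStepA mm) []
  if tmp = [] then "(None)"
  else String.ofList (((PySem.List.sorted2 tmp (fun x => -x.1) (fun x => x.2.2)).headD (0, [], 0)).2.1)

-- ===== PORT B =====
-- Source B's norm: a fold of str.replace over the pair table
def pvNormB (s : List Char) : List Char :=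
  [(['C','#'],['c']),(['D','#'],['d']),(['F','#'],['f']),(['G','#'],['g']),
   (['A','#'],['a']),(['E','#'],['e']),(['B','#'],['b'])].foldl
    (fun s ab => PySem.Chars.replace s ab.1 ab.2) s

-- Source B's to_min
def pvToMinB (t : List Char) : Int :=
  let parts := PySem.Chars.splitOn t [':']
  ((PySem.Int.ofChars? ((PySem.List.pyGet? parts 0).getD [])).getD 0) * 60 +
  ((PySem.Int.ofChars? ((PySem.List.pyGet? parts 1).getD [])).getD 0)

-- one iteration of Source B's loop body
def pvStepB (mm : List Char) (best : Option (Int × List Char)) (info : String) :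
    Option (Int × List Char) :=
  let p := PySem.Chars.splitOn info.toList [',']
  let dur := pvToMinB ((PySem.List.pyGet? p 1).getD []) - pvToMinB ((PySem.List.pyGet? p 0).getD [])
  let sheet := pvNormB ((PySem.List.pyGet? p 3).getD [])
  if sheet = [] then best
  else
    let played := PySem.List.slice (PySem.List.pyRepeat sheet (PySem.Int.floordiv dur (sheet.length : Int) + 1)) none (some dur)
    if PySem.Chars.isIn mm played && (match best with | none => true | some b => decide (b.1 < dur)) then
      some (dur, (PySem.List.pyGet? p 2).getD [])
    else best

def solution_alt (m : String) (musicinfos : List String) : String :=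
  let mm := pvNormB m.toList
  match musicinfos.foldl (pvStepB mm) none with
  | none => "(None)"
  | some b => String.ofList b.2

-- ===== PRECONDITION & SPEC =====
-- a time field parses in A: ≥ 2 ':'-pieces and every piece an int (A maps int over ALL pieces)
def pvTimeOkA (t : List Char) : Bool :=
  decide (2 ≤ (PySem.Chars.splitOn t [':']).length) &&
  (PySem.Chars.splitOn t [':']).all (fun p => (PySem.Int.ofChars? p).isSome)

def pvInfoOkA (info : String) : Bool :=
  decide (4 ≤ (PySem.Chars.splitOn info.toList [',']).length) &&
  pvTimeOkA ((PySem.List.pyGet? (PySem.Chars.splitOn info.toList [',']) 0).getD []) &&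
  pvTimeOkA ((PySem.List.pyGet? (PySem.Chars.splitOn info.toList [',']) 1).getD [])

-- Pre_ excludes exactly the inputs on which the Python A raises (IndexError/ValueError while
-- splitting and int-parsing a malformed musicinfo entry)
def Pre_solution (m : String) (musicinfos : List String) : Prop :=
  ∀ info ∈ musicinfos, pvInfoOkA info = true

instance (m : String) (musicinfos : List String) : Decidable (Pre_solution m musicinfos) := by
  unfold Pre_solution; infer_instance

def pvWitness_solution : String × List String := ("ABC", ["10:00,10:03,TITLE,ABC"])

def Spec_solution (m : String) (musicinfos : List String) (out : String) : Prop := out = solution_alt m musicinfos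
instance (m : String) (musicinfos : List String) (out : String) : Decidable (Spec_solution m musicinfos out) := by unfold Spec_solution; infer_instance

-- ===== CLAIM (what is proved, stated in full; the proofs are below) =====
def Claim_equal_solution : Prop := ∀ (m : String) (musicinfos : List String), Dom_solution m musicinfos → Pre_solution m musicinfos → Spec_solution m musicinfos (solution m musicinfos)

-- ===== LEMMAS AND PROOFS =====

-- the two normalisers agree (same seven replacements in the same order)
theorem pv_norm_eq (s : List Char) : pvNormB s = pvSharpA s := rfl

-- the two time parsers agree on every string (componentwise the same lookups)
theorem pv_time_eq (t : List Char) : pvTimeA t = pvToMinB t := by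
  unfold pvTimeA pvToMinB
  rcases PySem.Chars.splitOn t [':'] with _ | ⟨a, _ | ⟨b, r⟩⟩
  · simp [PySem.List.pyGet?, PySem.List.pyIdx?,
      (by decide : PySem.Int.ofChars? ([] : List Char) = none)]
  · simp [PySem.List.pyGet?, PySem.List.pyIdx?,
      (by decide : PySem.Int.ofChars? ([] : List Char) = none)]
  · have h0 : (0 : Int) ≤ (r.length : Int) + 1 := by positivity
    simp [PySem.List.pyGet?, PySem.List.pyIdx?, h0]

-- B's parsed pieces of one musicinfo entry
def pvSheet (info : String) : List Char :=
  pvNormB ((PySem.List.pyGet? (PySem.Chars.splitOn info.toList [',']) 3).getD [])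
def pvDur (info : String) : Int :=
  pvToMinB ((PySem.List.pyGet? (PySem.Chars.splitOn info.toList [',']) 1).getD []) -
  pvToMinB ((PySem.List.pyGet? (PySem.Chars.splitOn info.toList [',']) 0).getD [])
def pvTitle (info : String) : List Char :=
  (PySem.List.pyGet? (PySem.Chars.splitOn info.toList [',']) 2).getD []
def pvPlayed (info : String) : List Char :=
  PySem.List.slice (PySem.List.pyRepeat (pvSheet info) (PySem.Int.floordiv (pvDur info) ((pvSheet info).length : Int) + 1)) none (some (pvDur info))
def pvMatch (mm : List Char) (info : String) : Bool :=
  decide (pvSheet info ≠ []) && PySem.Chars.isIn mm (pvPlayed info)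

-- the list of matches with their indices, in broadcast order
def pvSel (mm : List Char) : List String → Int → List (Int × List Char × Int)
  | [], _ => []
  | i :: t, v =>
    (if pvMatch mm i then [(pvDur i, pvTitle i, v)] else []) ++ pvSel mm t (v + 1)

def pvG (sheet : List Char) (j : Int) : Char :=
  if (sheet.length : Int) < j then
    (PySem.List.pyGet? sheet (PySem.Int.mod j (sheet.length : Int) - 1)).getD ' '
  else
    (PySem.List.pyGet? sheet (j - 1)).getD ' '

theorem pv_succ_mod (i len : Nat) (h : 0 < len) :
    (i + 1) % len = if i % len + 1 = len then 0 else i % len + 1 := by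
  have h1 : i % len < len := Nat.mod_lt _ h
  conv_lhs => rw [← Nat.div_add_mod i len]
  rw [Nat.add_assoc, Nat.mul_add_mod]
  split
  · next heq => rw [heq, Nat.mod_self]
  · next hne => exact Nat.mod_eq_of_lt (by omega)

theorem pv_tile_get (sheet : List Char) (hs : 0 < sheet.length) :
    ∀ (k i : Nat), i < k * sheet.length →
      (List.replicate k sheet).flatten[i]? = sheet[i % sheet.length]? := by
  intro k
  induction k with
  | zero => intro i hi; omega
  | succ k ih =>
    intro i hi
    rw [List.replicate_succ, List.flatten_cons]
    rcases Nat.lt_or_ge i sheet.length with hl | hl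
    · rw [List.getElem?_append_left hl, Nat.mod_eq_of_lt hl]
    · have hmul : (k + 1) * sheet.length = k * sheet.length + sheet.length := by ring
      rw [List.getElem?_append_right hl, ih (i - sheet.length) (by omega)]
      congr 1
      conv_rhs => rw [show i = sheet.length + (i - sheet.length) by omega]
      rw [Nat.add_mod_left]

theorem pv_g_eq (sheet : List Char) (hs : 0 < sheet.length) (i : Nat) (hm : i % sheet.length < sheet.length) :
    pvG sheet (1 + (i : Int)) = sheet[i % sheet.length]'hm := by
  unfold pvG
  by_cases hc : (sheet.length : Int) < 1 + (i : Int)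
  · rw [if_pos hc]
    have hle : sheet.length ≤ i := by omega
    have hcast : (1 + (i : Int)) = ((i + 1 : Nat) : Int) := by push_cast; ring
    rw [hcast, PySem.Int.mod_natCast]
    rw [pv_succ_mod i sheet.length hs]
    split
    · next heq =>
      -- index is -1 : last element
      have : sheet[i % sheet.length]'hm = sheet[sheet.length - 1]'(by omega) := by
        congr 1; omega
      rw [this]
      simp only [PySem.List.pyGet?, PySem.List.pyIdx?]
      norm_num
      rw [if_pos (by omega : 1 ≤ sheet.length)]
      simp [List.getElem?_eq_getElem (show sheet.length - 1 < sheet.length by omega)]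
    · next hne =>
      have hcast2 : ((i % sheet.length + 1 : Nat) : Int) - 1 = ((i % sheet.length : Nat) : Int) := by omega
      rw [hcast2, PySem.List.pyGet?_natCast, List.getElem?_eq_getElem hm, Option.getD_some]
  · rw [if_neg hc]
    have hlt : i < sheet.length := by omega
    have hcast : (1 + (i : Int)) - 1 = ((i : Nat) : Int) := by push_cast; ring
    rw [hcast, PySem.List.pyGet?_natCast]
    have : i % sheet.length = i := Nat.mod_eq_of_lt hlt
    simp only [this] at hm ⊢
    rw [List.getElem?_eq_getElem hlt, Option.getD_some]

theorem pv_melody_eq (sheet : List Char) (hsne : sheet ≠ []) (dur : Int) :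
    (PySem.List.pyRange 1 (dur + 1)).foldl (fun li j =>
      if (sheet.length : Int) < j then
        li ++ [(PySem.List.pyGet? sheet (PySem.Int.mod j (sheet.length : Int) - 1)).getD ' ']
      else
        li ++ [(PySem.List.pyGet? sheet (j - 1)).getD ' ']) [] =
    PySem.List.slice (PySem.List.pyRepeat sheet (PySem.Int.floordiv dur (sheet.length : Int) + 1)) none (some dur) := by
  have hs : 0 < sheet.length := List.length_pos_iff.mpr hsne
  have hsi : (0 : Int) < (sheet.length : Int) := by exact_mod_cast hs
  have hfun : (fun (li : List Char) (j : Int) =>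
      if (sheet.length : Int) < j then
        li ++ [(PySem.List.pyGet? sheet (PySem.Int.mod j (sheet.length : Int) - 1)).getD ' ']
      else li ++ [(PySem.List.pyGet? sheet (j - 1)).getD ' ']) =
      fun li j => li ++ [pvG sheet j] := by
    funext li j; by_cases h : (sheet.length : Int) < j <;> simp [pvG, h]
  rw [hfun, PySem.List.foldl_append_singleton_eq_map, List.nil_append, PySem.List.pyRange_one]
  have h01 : (dur + 1 - 1) = dur := by ring
  rw [h01]
  rcases lt_or_ge 0 dur with hd | hd
  · -- positive duration
    have hfd0 : 0 ≤ PySem.Int.floordiv dur (sheet.length : Int) :=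
      (PySem.Int.le_floordiv_iff_mul_le hsi).mpr (by omega)
    have hrep0 : 0 ≤ PySem.Int.floordiv dur (sheet.length : Int) + 1 := by omega
    have hdlt : dur < (PySem.Int.floordiv dur (sheet.length : Int) + 1) * (sheet.length : Int) :=
      (PySem.Int.floordiv_lt_iff_lt_mul hsi).mp (by omega)
    have hcast : (((PySem.Int.floordiv dur (sheet.length : Int) + 1).toNat * sheet.length : Nat) : Int) =
        (PySem.Int.floordiv dur (sheet.length : Int) + 1) * (sheet.length : Int) := by
      push_cast [Int.toNat_of_nonneg hrep0]; ring
    have hnlt : dur.toNat < (PySem.Int.floordiv dur (sheet.length : Int) + 1).toNat * sheet.length := by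
      omega
    rw [PySem.List.slice_to _ (le_of_lt hd)]
    simp only [PySem.List.pyRepeat]
    apply List.ext_getElem?
    intro i
    rw [List.getElem?_take, List.getElem?_map, List.getElem?_map]
    rcases Nat.lt_or_ge i dur.toNat with hi | hi
    · rw [if_pos hi, List.getElem?_range hi, pv_tile_get sheet hs _ i (by omega)]
      have hmlt : i % sheet.length < sheet.length := Nat.mod_lt _ hs
      rw [List.getElem?_eq_getElem hmlt]
      simp only [Option.map_some]
      rw [pv_g_eq sheet hs i hmlt]
    · rw [if_neg (by omega), List.getElem?_eq_none (by simpa using hi)]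
      rfl
  · -- dur ≤ 0 : both sides empty
    have hrange : dur.toNat = 0 := by omega
    rw [hrange]
    rcases eq_or_lt_of_le hd with he | hlt
    · -- dur = 0
      rw [he, PySem.List.slice_to _ le_rfl]
      simp
    · -- dur < 0 : zero repetitions
      have hfd : PySem.Int.floordiv dur (sheet.length : Int) < 0 := by
        rw [PySem.Int.floordiv_lt_iff_lt_mul hsi]; omega
      have hrep : (PySem.Int.floordiv dur (sheet.length : Int) + 1).toNat = 0 := by omega
      simp only [PySem.List.pyRepeat, hrep, List.replicate_zero, List.flatten_nil]
      simp [PySem.List.slice, PySem.List.clampIdx]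

theorem stepA_core (mm : List Char) (tmp : List (Int × List Char × Int)) (v dur : Int)
    (title sheet li played : List Char) (hli : sheet ≠ [] → li = played) :
    (if sheet = [] then tmp
     else if PySem.Chars.isIn mm li = true then tmp ++ [(dur, title, v)] else tmp)
    = tmp ++ (if (decide (sheet ≠ []) && PySem.Chars.isIn mm played) = true then [(dur, title, v)] else []) := by
  by_cases hs : sheet = []
  · simp [hs]
  · rw [if_neg hs, hli hs]
    by_cases hin : PySem.Chars.isIn mm played = true <;> simp [hs, hin]

theorem pv_stepA_eq (mm : List Char) (tmp : List (Int × List Char × Int)) (v : Int) (i : String) :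
    pvStepA mm tmp (v, i) = tmp ++ (if pvMatch mm i then [(pvDur i, pvTitle i, v)] else []) := by
  have hdur : pvTimeA ((PySem.List.pyGet? (PySem.Chars.splitOn i.toList [',']) 1).getD []) -
      pvTimeA ((PySem.List.pyGet? (PySem.Chars.splitOn i.toList [',']) 0).getD []) = pvDur i := by
    rw [pv_time_eq, pv_time_eq]; rfl
  have hsheet : pvSharpA ((PySem.List.pyGet? (PySem.Chars.splitOn i.toList [',']) 3).getD []) = pvSheet i :=
    (pv_norm_eq _).symm
  have hA : pvStepA mm tmp (v, i) =
      (if pvSharpA ((PySem.List.pyGet? (PySem.Chars.splitOn i.toList [',']) 3).getD []) = [] then tmp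
       else if PySem.Chars.isIn mm
           ((PySem.List.pyRange 1 ((pvTimeA ((PySem.List.pyGet? (PySem.Chars.splitOn i.toList [',']) 1).getD []) -
              pvTimeA ((PySem.List.pyGet? (PySem.Chars.splitOn i.toList [',']) 0).getD [])) + 1)).foldl (fun li j =>
             if ((pvSharpA ((PySem.List.pyGet? (PySem.Chars.splitOn i.toList [',']) 3).getD [])).length : Int) < j then
               li ++ [(PySem.List.pyGet? (pvSharpA ((PySem.List.pyGet? (PySem.Chars.splitOn i.toList [',']) 3).getD []))
                 (PySem.Int.mod j ((pvSharpA ((PySem.List.pyGet? (PySem.Chars.splitOn i.toList [',']) 3).getD [])).length : Int) - 1)).getD ' ']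
             else
               li ++ [(PySem.List.pyGet? (pvSharpA ((PySem.List.pyGet? (PySem.Chars.splitOn i.toList [',']) 3).getD [])) (j - 1)).getD ' ']) []) = true then
         tmp ++ [(pvTimeA ((PySem.List.pyGet? (PySem.Chars.splitOn i.toList [',']) 1).getD []) -
            pvTimeA ((PySem.List.pyGet? (PySem.Chars.splitOn i.toList [',']) 0).getD []), (PySem.List.pyGet? (PySem.Chars.splitOn i.toList [',']) 2).getD [], v)]
       else tmp) := rfl
  rw [hdur, hsheet] at hA
  exact hA.trans (stepA_core mm tmp v (pvDur i) (pvTitle i) (pvSheet i) _ (pvPlayed i)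
    (fun hs => pv_melody_eq (pvSheet i) hs (pvDur i)))

def pvOptStep (b : Option (Int × List Char)) (y : Int × List Char × Int) : Option (Int × List Char) :=
  match b with
  | none => some (y.1, y.2.1)
  | some bb => if bb.1 < y.1 then some (y.1, y.2.1) else b

theorem stepB_core (mm : List Char) (b : Option (Int × List Char)) (v dur : Int) (title sheet played : List Char) :
    (if sheet = [] then b
     else if (PySem.Chars.isIn mm played && match b with | none => true | some bb => decide (bb.1 < dur)) = true
          then some (dur, title) else b)
    = ((if (decide (sheet ≠ []) && PySem.Chars.isIn mm played) = true then [(dur, title, v)] else []) : List (Int × List Char × Int)).foldl pvOptStep b := by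
  by_cases hs : sheet = []
  · simp [hs]
  · cases b with
    | none => by_cases hin : PySem.Chars.isIn mm played = true <;> simp [hs, hin, pvOptStep]
    | some bb =>
      by_cases hin : PySem.Chars.isIn mm played = true <;>
        by_cases hlt : bb.1 < dur <;> simp [hs, hin, hlt, pvOptStep]

theorem pv_stepB_eq (mm : List Char) (b : Option (Int × List Char)) (v : Int) (i : String) :
    pvStepB mm b i = ((if pvMatch mm i then [(pvDur i, pvTitle i, v)] else []) : List _).foldl pvOptStep b :=
  stepB_core mm b v (pvDur i) (pvTitle i) (pvSheet i) (pvPlayed i)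

-- head of an insertBy fold is the before-first-minimal running pick
theorem pv_insertBy_cons {α : Type} (before : α → α → Bool) (x h : α) (t : List α) :
    PySem.List.insertBy before x (h :: t) =
      if before x h then x :: h :: t else h :: PySem.List.insertBy before x t := rfl

theorem pv_head_foldl_insertBy {α : Type} (before : α → α → Bool) (xs : List α) :
    ∀ (h : α) (t : List α), ∃ t',
      xs.foldl (fun acc x => PySem.List.insertBy before x acc) (h :: t) =
        (xs.foldl (fun c y => if before y c then y else c) h) :: t' := by
  induction xs with
  | nil => intro h t; exact ⟨t, rfl⟩
  | cons y ys ih =>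
    intro h t
    rw [List.foldl_cons, List.foldl_cons, pv_insertBy_cons]
    by_cases hb : before y h
    · rw [if_pos hb, if_pos hb]; exact ih y (h :: t)
    · rw [if_neg hb, if_neg hb]; exact ih h _

-- the lexicographic tie-break on strictly increasing indices degenerates to strict duration
theorem pv_pick_eq (xs : List (Int × List Char × Int)) :
    ∀ c, (∀ y ∈ xs, c.2.2 < y.2.2) → xs.Pairwise (fun a b => a.2.2 < b.2.2) →
      xs.foldl (fun c y => if (decide (-y.1 < -c.1) || (!decide (-c.1 < -y.1) && decide (y.2.2 < c.2.2))) then y else c) c =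
      xs.foldl (fun c y => if c.1 < y.1 then y else c) c := by
  induction xs with
  | nil => intro c _ _; rfl
  | cons y ys ih =>
    intro c hlt hp
    rw [List.foldl_cons, List.foldl_cons]
    have hy : c.2.2 < y.2.2 := hlt y (by simp)
    have hcond : (decide (-y.1 < -c.1) || (!decide (-c.1 < -y.1) && decide (y.2.2 < c.2.2))) = decide (c.1 < y.1) := by
      have : ¬ (y.2.2 < c.2.2) := by omega
      simp [this]
    rw [hcond]
    rcases List.pairwise_cons.mp hp with ⟨hy2, hp'⟩
    by_cases h : c.1 < y.1
    · rw [if_pos (by simpa using h), if_pos h]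
      exact ih y hy2 hp'
    · rw [if_neg (by simpa using h), if_neg h]
      exact ih c (fun z hz => lt_trans hy (hy2 z hz)) hp'

-- the Option running best is the projected running pick
theorem pv_optfold_eq (xs : List (Int × List Char × Int)) :
    ∀ c : Int × List Char × Int,
      xs.foldl pvOptStep (some (c.1, c.2.1)) =
        some ((xs.foldl (fun c y => if c.1 < y.1 then y else c) c).1,
              (xs.foldl (fun c y => if c.1 < y.1 then y else c) c).2.1) := by
  induction xs with
  | nil => intro c; rfl
  | cons y ys ih =>
    intro c
    rw [List.foldl_cons, List.foldl_cons]
    by_cases h : c.1 < y.1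
    · rw [show pvOptStep (some (c.1, c.2.1)) y = some (y.1, y.2.1) by simp [pvOptStep, h],
        if_pos h]
      exact ih y
    · rw [show pvOptStep (some (c.1, c.2.1)) y = some (c.1, c.2.1) by simp [pvOptStep, h],
        if_neg h]
      exact ih c

theorem pv_select_eq (tmp : List (Int × List Char × Int))
    (hp : tmp.Pairwise (fun a b => a.2.2 < b.2.2)) :
    (if tmp = [] then "(None)"
     else String.ofList (((PySem.List.sorted2 tmp (fun x => -x.1) (fun x => x.2.2)).headD (0, [], 0)).2.1)) =
    (match tmp.foldl pvOptStep none with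
     | none => "(None)"
     | some b => String.ofList b.2) := by
  cases tmp with
  | nil => rfl
  | cons x xs =>
    rw [if_neg (by simp)]
    have hs2 : PySem.List.sorted2 (x :: xs) (fun y => -y.1) (fun y => y.2.2) =
        xs.foldl (fun acc z => PySem.List.insertBy
          (fun a b => (decide (-a.1 < -b.1) || (!decide (-b.1 < -a.1) && decide (a.2.2 < b.2.2)))) z acc) [x] := rfl
    obtain ⟨t', ht⟩ := pv_head_foldl_insertBy (α := Int × List Char × Int)
      (fun a b => (decide (-a.1 < -b.1) || (!decide (-b.1 < -a.1) && decide (a.2.2 < b.2.2)))) xs x []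
    rcases List.pairwise_cons.mp hp with ⟨hx, hp'⟩
    have hhead : ((PySem.List.sorted2 (x :: xs) (fun y => -y.1) (fun y => y.2.2)).headD (0, [], 0)) =
        xs.foldl (fun c y => if c.1 < y.1 then y else c) x := by
      rw [hs2]
      rw [ht]
      rw [List.headD_cons]
      rw [pv_pick_eq xs x hx hp']
    rw [hhead, show (x :: xs).foldl pvOptStep none = xs.foldl pvOptStep (some (x.1, x.2.1)) from rfl,
      pv_optfold_eq xs x]

-- A's whole loop produces pvSel
theorem pv_loopA_eq (mm : List Char) (infos : List String) (v : Int) (tmp : List (Int × List Char × Int)) :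
    (PySem.List.enumerate infos v).foldl (pvStepA mm) tmp = tmp ++ pvSel mm infos v := by
  induction infos generalizing v tmp with
  | nil => simp [PySem.List.enumerate, pvSel]
  | cons i t ih =>
    have henum : PySem.List.enumerate (i :: t) v = (v, i) :: PySem.List.enumerate t (v + 1) := by
      simp [PySem.List.enumerate]
    rw [henum, List.foldl_cons, ih, pv_stepA_eq, pvSel, List.append_assoc]


-- B's whole loop is the running-best fold over pvSel
theorem pv_loopB_eq (mm : List Char) (infos : List String) (v : Int) (b : Option (Int × List Char)) :
    infos.foldl (pvStepB mm) b = (pvSel mm infos v).foldl pvOptStep b := by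
  induction infos generalizing v b with
  | nil => simp [pvSel]
  | cons i t ih =>
    simp only [List.foldl_cons, pvSel, List.foldl_append]
    rw [ih (v + 1), pv_stepB_eq mm b v i]


theorem pv_sel_ge (mm : List Char) (infos : List String) (v : Int) :
    ∀ y ∈ pvSel mm infos v, v ≤ y.2.2 := by
  induction infos generalizing v with
  | nil => simp [pvSel]
  | cons i t ih =>
    intro y hy
    rw [pvSel, List.mem_append] at hy
    rcases hy with hy | hy
    · split at hy <;> simp_all
    · have := ih (v + 1) y hy; omega

theorem pv_sel_pairwise (mm : List Char) (infos : List String) (v : Int) :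
    (pvSel mm infos v).Pairwise (fun a b => a.2.2 < b.2.2) := by
  induction infos generalizing v with
  | nil => simp [pvSel]
  | cons i t ih =>
    rw [pvSel, List.pairwise_append]
    refine ⟨?_, ih (v + 1), ?_⟩
    · split <;> simp
    · intro a ha b hb
      have hb' := pv_sel_ge mm t (v + 1) b hb
      split at ha <;> simp_all

-- ===== VERDICT (by name: the statement is the Claim_ definition above) =====
theorem solution_spec : Claim_equal_solution := by
  intro m musicinfos _ _
  unfold Spec_solution solution solution_alt
  simp only [pv_norm_eq, pv_loopA_eq (pvSharpA m.toList) musicinfos 0 [],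
    pv_loopB_eq (pvSharpA m.toList) musicinfos 0 none, List.nil_append]
  exact pv_select_eq (pvSel (pvSharpA m.toList) musicinfos 0)
    (pv_sel_pairwise (pvSharpA m.toList) musicinfos 0)
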